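-- pv_equiv track=rewrite | github.com/wfpidn/FSVA-app | app/mapstory/scripts/data-jatim/parse.py | resolve_range
-- ===== SOURCE A (Python) =====
-- def resolve_range(id, values):
--     min = None
--     max = None
--     for e in values:
--         if e['indicator'] != id or e['value'] is None:
--             continue
--         v = e['value']
--         if min is None or min > v:
--             min = v
--         if max is None or max < v:
--             max = v
--     return {'min': min, 'max': max}
-- ===== SOURCE B (Python) =====
-- def resolve_range(id, values):
--     xs = [e['value'] for e in values if e['indicator'] == id and e['value'] is not None]
--     return {'min': min(xs) if xs else None, 'max': max(xs) if xs else None}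
-- ===== Notes on version B (the rewrite author's own statement) =====
-- stated objective: simpler
-- what changed: Replaces A's single fused loop that maintains both running extremes with None sentinels by a filter comprehension followed by two independent built-in min/max reductions guarded by an emptiness check.
-- outside the precondition, e.g. on resolve_range(1, [{'value': 3}]): A raises KeyError, B raises KeyError; on resolve_range(1, [{'indicator': 1}]): A raises KeyError, B raises KeyError
import Mathlib
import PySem

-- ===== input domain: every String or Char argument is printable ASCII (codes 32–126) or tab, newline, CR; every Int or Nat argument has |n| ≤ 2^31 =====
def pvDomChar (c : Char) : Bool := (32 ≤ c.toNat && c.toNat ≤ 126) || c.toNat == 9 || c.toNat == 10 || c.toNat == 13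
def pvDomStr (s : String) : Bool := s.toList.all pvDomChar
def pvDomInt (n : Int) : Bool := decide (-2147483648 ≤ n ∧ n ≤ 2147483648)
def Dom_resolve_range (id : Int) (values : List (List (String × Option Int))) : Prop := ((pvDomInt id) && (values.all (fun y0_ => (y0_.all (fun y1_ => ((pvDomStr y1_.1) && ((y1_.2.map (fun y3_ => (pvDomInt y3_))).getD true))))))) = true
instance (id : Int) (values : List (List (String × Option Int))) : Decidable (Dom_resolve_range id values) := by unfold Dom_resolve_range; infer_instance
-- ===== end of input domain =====

-- B replaces A's fused min/max-tracking loop by a filter pass followed by two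
-- independent built-in reductions (min/max of the filtered list); objective: simpler.


-- ===== PORT A =====
-- the two running-extreme updates of A's loop body
def pvStepMin (a : Option Int) (v : Int) : Option Int :=
  match a with
  | none => some v
  | some m => if m > v then some v else some m

def pvStepMax (a : Option Int) (v : Int) : Option Int :=
  match a with
  | none => some v
  | some m => if m < v then some v else some m

-- '.getD none' only fires on key-miss inputs, which Pre_ excludes (Python raises KeyError there)
def resolve_range (id : Int) (values : List (List (String × Option Int))) : List (String × Option Int) :=
  let p := values.foldl
    (fun (st : Option Int × Option Int) e =>
      if ((PySem.Dict.mk e).get? "indicator").getD none ≠ some id then st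
      else
        match ((PySem.Dict.mk e).get? "value").getD none with
        | none => st
        | some v => (pvStepMin st.1 v, pvStepMax st.2 v))
    (none, none)
  [("min", p.1), ("max", p.2)]

-- ===== PORT B =====
def resolve_range_alt (id : Int) (values : List (List (String × Option Int))) : List (String × Option Int) :=
  let xs := values.filterMap (fun e =>
    if ((PySem.Dict.mk e).get? "indicator").getD none = some id then ((PySem.Dict.mk e).get? "value").getD none
    else none)
  [("min", PySem.List.min? xs (fun x => x)), ("max", PySem.List.max? xs (fun x => x))]

-- ===== PRECONDITION & SPEC =====
-- Pre_ excludes exactly the inputs where Python's A raises KeyError: an entry without an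
-- 'indicator' key, or an entry whose indicator equals id but which lacks a 'value' key.
def Pre_resolve_range (id : Int) (values : List (List (String × Option Int))) : Prop :=
  ∀ e ∈ values, ((PySem.Dict.mk e).get? "indicator").isSome ∧
    ((PySem.Dict.mk e).get? "indicator" = some (some id) → ((PySem.Dict.mk e).get? "value").isSome)
instance (id : Int) (values : List (List (String × Option Int))) : Decidable (Pre_resolve_range id values) := by unfold Pre_resolve_range; infer_instance

def pvWitness_resolve_range : Int × (List (List (String × Option Int))) :=
  (1, [[("indicator", some 1), ("value", some 4)], [("indicator", some 2), ("value", none)]])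

def Spec_resolve_range (id : Int) (values : List (List (String × Option Int))) (out : List (String × Option Int)) : Prop := out = resolve_range_alt id values
instance (id : Int) (values : List (List (String × Option Int))) (out : List (String × Option Int)) : Decidable (Spec_resolve_range id values out) := by unfold Spec_resolve_range; infer_instance

-- ===== CLAIM (what is proved, stated in full; the proofs are below) =====
def Claim_equal_resolve_range : Prop := ∀ (id : Int) (values : List (List (String × Option Int))), Dom_resolve_range id values → Pre_resolve_range id values → Spec_resolve_range id values (resolve_range id values)

-- ===== LEMMAS AND PROOFS =====

theorem pvStepMin_some (m : Int) (xs : List Int) :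
    xs.foldl pvStepMin (some m) = some (xs.foldl min m) := by
  induction xs generalizing m with
  | nil => rfl
  | cons x t ih =>
      have h1 : pvStepMin (some m) x = some (min m x) := by
        simp only [pvStepMin, min_def]
        split_ifs <;> congr 1 <;> omega
      simp only [List.foldl, h1, ih]

theorem pvStepMax_some (m : Int) (xs : List Int) :
    xs.foldl pvStepMax (some m) = some (xs.foldl max m) := by
  induction xs generalizing m with
  | nil => rfl
  | cons x t ih =>
      have h1 : pvStepMax (some m) x = some (max m x) := by
        simp only [pvStepMax, max_def]
        split_ifs <;> congr 1 <;> omega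
      simp only [List.foldl, h1, ih]

theorem pvStepMin_none (xs : List Int) :
    xs.foldl pvStepMin none = PySem.List.min? xs (fun x => x) := by
  cases xs with
  | nil => rfl
  | cons x t =>
      rw [PySem.List.min?_id_cons]
      simpa [List.foldl, pvStepMin] using pvStepMin_some x t

theorem pvStepMax_none (xs : List Int) :
    xs.foldl pvStepMax none = PySem.List.max? xs (fun x => x) := by
  cases xs with
  | nil => rfl
  | cons x t =>
      rw [PySem.List.max?_id_cons]
      simpa [List.foldl, pvStepMax] using pvStepMax_some x t

theorem pvFold_pair (id : Int) (values : List (List (String × Option Int)))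
    (mn mx : Option Int) :
    values.foldl
      (fun (st : Option Int × Option Int) e =>
        if ((PySem.Dict.mk e).get? "indicator").getD none ≠ some id then st
        else
          match ((PySem.Dict.mk e).get? "value").getD none with
          | none => st
          | some v => (pvStepMin st.1 v, pvStepMax st.2 v))
      (mn, mx)
    = ((values.filterMap (fun e =>
          if ((PySem.Dict.mk e).get? "indicator").getD none = some id then ((PySem.Dict.mk e).get? "value").getD none
          else none)).foldl pvStepMin mn,
       (values.filterMap (fun e =>
          if ((PySem.Dict.mk e).get? "indicator").getD none = some id then ((PySem.Dict.mk e).get? "value").getD none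
          else none)).foldl pvStepMax mx) := by
  induction values generalizing mn mx with
  | nil => rfl
  | cons e t ih =>
      by_cases h : ((PySem.Dict.mk e).get? "indicator").getD none = some id
      · cases hv : ((PySem.Dict.mk e).get? "value").getD none with
        | none => simpa [List.foldl, List.filterMap_cons, h, hv] using ih mn mx
        | some v => simpa [List.foldl, List.filterMap_cons, h, hv] using ih (pvStepMin mn v) (pvStepMax mx v)
      · simpa [List.foldl, List.filterMap_cons, h] using ih mn mx

-- ===== VERDICT (by name: the statement is the Claim_ definition above) =====
theorem resolve_range_spec : Claim_equal_resolve_range := by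
  intro id values _ _
  show resolve_range id values = resolve_range_alt id values
  simp only [resolve_range, resolve_range_alt, pvFold_pair, pvStepMin_none, pvStepMax_none]
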